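-- pv_equiv track=rewrite | github.com/lpang36/catdraft | src/draft.py | process_positions
-- ===== SOURCE A (Python) =====
-- def process_positions(args):
--     positions = {}
--     cur_pos = ''
--     for i, arg in enumerate(args):
--         if i % 2 == 0:
--             cur_pos = arg
--         else:
--             positions[cur_pos] = int(arg)
--     return positions
-- ===== SOURCE B (Python) =====
-- def process_positions(args):
--     return {k: int(v) for k, v in zip(args[::2], args[1::2])}
-- ===== Notes on version B (the rewrite author's own statement) =====
-- stated objective: idiomatic
-- what changed: Replaces the parity-flag loop with cur_pos state by slicing args into keys (args[::2]) and values (args[1::2]) and building the dict with a comprehension over zip; zip's truncation matches A's drop of a trailing unpaired key.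
import Mathlib
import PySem

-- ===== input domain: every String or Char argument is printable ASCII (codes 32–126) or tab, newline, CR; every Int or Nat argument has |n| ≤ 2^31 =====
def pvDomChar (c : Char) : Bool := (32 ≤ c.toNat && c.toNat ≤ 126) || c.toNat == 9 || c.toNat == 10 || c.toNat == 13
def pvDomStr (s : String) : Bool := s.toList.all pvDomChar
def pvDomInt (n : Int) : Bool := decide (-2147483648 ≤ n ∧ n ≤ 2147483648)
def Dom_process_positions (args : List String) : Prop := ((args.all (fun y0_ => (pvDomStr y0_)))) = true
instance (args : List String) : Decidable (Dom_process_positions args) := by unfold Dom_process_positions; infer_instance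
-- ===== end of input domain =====

-- B replaces A's parity-flag loop (cur_pos state, i % 2 branch) by slicing into
-- keys/values and zipping them; idiomatic, same cost.

-- ===== PORT A =====
-- the for-loop of A over enumerate(args); int(arg) ported as PySem.Int.ofStr?,
-- whose `none` (= ValueError) is propagated (excluded by Pre_)
def pvALoop : List (Int × String) → PySem.Dict String Int → String →
    Option (PySem.Dict String Int)
  | [], positions, _ => some positions
  | (i, arg) :: rest, positions, cur_pos =>
      if i % 2 == 0 then
        pvALoop rest positions arg
      else
        (PySem.Int.ofStr? arg).bind fun n => pvALoop rest (positions.insert cur_pos n) cur_pos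

def process_positions (args : List String) : List (String × Int) :=
  ((pvALoop (PySem.List.enumerate args 0) PySem.Dict.empty "").getD PySem.Dict.empty).items

-- ===== PORT B =====
-- hand port of the slices args[::2] / args[1::2] (exact for every list: step-2
-- slicing of the whole list takes the even-index / odd-index elements in order)
def pvEvens : List String → List String
  | [] => []
  | [x] => [x]
  | x :: _ :: xs => x :: pvEvens xs

def pvOdds : List String → List String
  | [] => []
  | [_] => []
  | _ :: y :: xs => y :: pvOdds xs

-- the dict comprehension over zip(keys, values); int(v) as PySem.Int.ofStr?
def pvBuild : List (String × String) → PySem.Dict String Int →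
    Option (PySem.Dict String Int)
  | [], d => some d
  | (k, v) :: rest, d => (PySem.Int.ofStr? v).bind fun n => pvBuild rest (d.insert k n)

def process_positions_alt (args : List String) : List (String × Int) :=
  ((pvBuild ((pvEvens args).zip (pvOdds args)) PySem.Dict.empty).getD PySem.Dict.empty).items

-- ===== PRECONDITION & SPEC =====
-- Pre_ excludes exactly the inputs on which A raises ValueError: some odd-index
-- element of args is not parseable by int()
def Pre_process_positions (args : List String) : Prop :=
  ∀ i : Nat, i < args.length → i % 2 = 1 → (PySem.Int.ofStr? (args.getD i "")).isSome = true
instance (args : List String) : Decidable (Pre_process_positions args) := by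
  unfold Pre_process_positions; infer_instance

def pvWitness_process_positions : List String := ["a", "1", "b", " -2 "]

def Spec_process_positions (args : List String) (out : List (String × Int)) : Prop :=
  out = process_positions_alt args
instance (args : List String) (out : List (String × Int)) :
    Decidable (Spec_process_positions args out) := by
  unfold Spec_process_positions; infer_instance

-- ===== CLAIM (what is proved, stated in full; the proofs are below) =====
def Claim_equal_process_positions : Prop :=
  ∀ (args : List String), Dom_process_positions args → Pre_process_positions args →
    Spec_process_positions args (process_positions args)

-- ===== LEMMAS AND PROOFS =====

-- A's enumerate-with-parity loop computes the same dict as B's fold over the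
-- zipped even/odd sublists, for any even starting index.
lemma pvALoop_eq_build (args : List String) :
    ∀ (s : Int), s % 2 = 0 → ∀ (d : PySem.Dict String Int) (cur : String),
      pvALoop (PySem.List.enumerate args s) d cur
        = pvBuild ((pvEvens args).zip (pvOdds args)) d := by
  induction args using pvEvens.induct with
  | case1 => intro s _ d cur; simp [PySem.List.enumerate_nil, pvALoop, pvEvens, pvOdds, pvBuild]
  | case2 x =>
      intro s hs d cur
      simp only [PySem.List.enumerate_cons, PySem.List.enumerate_nil]
      rw [pvALoop]
      simp [show (s % 2 == 0) = true by simp [hs], pvALoop, pvEvens, pvOdds, pvBuild]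
  | case3 x y xs ih =>
      intro s hs d cur
      simp only [PySem.List.enumerate_cons]
      rw [pvALoop]
      simp only [show (s % 2 == 0) = true by simp [hs]]
      rw [pvALoop]
      have h1 : ((s + 1) % 2 == 0) = false := by
        simp only [beq_eq_false_iff_ne, ne_eq]; omega
      simp only [h1, if_true]
      have hs2 : (s + 1 + 1) % 2 = 0 := by omega
      simp only [pvEvens, pvOdds, List.zip_cons_cons, pvBuild]
      cases PySem.Int.ofStr? y with
      | none => simp
      | some n => simp [ih (s + 1 + 1) hs2]

-- ===== VERDICT (by name: the statement is the Claim_ definition above) =====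
theorem process_positions_spec : Claim_equal_process_positions := by
  intro args _ _
  unfold Spec_process_positions process_positions process_positions_alt
  rw [pvALoop_eq_build args 0 (by decide)]
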